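-- pv_equiv track=rewrite | github.com/xmujin/CLP-Recognition | src/character_split.py | FindHSplitPos
-- ===== SOURCE A (Python) =====
-- def FindHSplitPos(h, threshold=10000, width=30):
--     start = 0
--     end = 0
--     # 双指针法
--     l = 0
--     r = 0
--     while r < len(h):
--         if h[r] <= threshold:
--             # 移动右指针
--             r += 1
--         else:  # 如果碰到了大于threshold
--             temp = r
--             count = 0  # 保存大于于阈值的个数的个数
--             while h[temp] > threshold:
--                 count += 1
--                 temp += 1
--                 if temp >= len(h):
--                     break
--             if count >= width:
--                 l = r
--                 r += count
--                 start = l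
--                 end = r
--             else:
--                 r += count
--                 l = r  # 移动左指针
--     return [start, end]
-- ===== SOURCE B (Python) =====
-- def FindHSplitPos(h, threshold=10000, width=30):
--     # Pass 1: build a run table of maximal runs of values > threshold, as (start, length).
--     runs = []
--     for i, v in enumerate(h):
--         if v > threshold:
--             if runs and runs[-1][0] + runs[-1][1] == i:
--                 s, ln = runs[-1]
--                 runs[-1] = (s, ln + 1)
--             else:
--                 runs.append((i, 1))
--     # Pass 2: last run wide enough wins.
--     for s, ln in reversed(runs):
--         if ln >= width:
--             return [s, s + ln]
--     return [0, 0]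
-- ===== Notes on version B (the rewrite author's own statement) =====
-- stated objective: simpler
-- what changed: A's interleaved two-pointer scan with an inner counting loop and four mutable indices is replaced by two separate passes: a single forward fold that builds a run table of maximal runs of values > threshold as (start, length) pairs, then a reverse scan of that table returning the first (i.e. last) run of length >= width.
import Mathlib
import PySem

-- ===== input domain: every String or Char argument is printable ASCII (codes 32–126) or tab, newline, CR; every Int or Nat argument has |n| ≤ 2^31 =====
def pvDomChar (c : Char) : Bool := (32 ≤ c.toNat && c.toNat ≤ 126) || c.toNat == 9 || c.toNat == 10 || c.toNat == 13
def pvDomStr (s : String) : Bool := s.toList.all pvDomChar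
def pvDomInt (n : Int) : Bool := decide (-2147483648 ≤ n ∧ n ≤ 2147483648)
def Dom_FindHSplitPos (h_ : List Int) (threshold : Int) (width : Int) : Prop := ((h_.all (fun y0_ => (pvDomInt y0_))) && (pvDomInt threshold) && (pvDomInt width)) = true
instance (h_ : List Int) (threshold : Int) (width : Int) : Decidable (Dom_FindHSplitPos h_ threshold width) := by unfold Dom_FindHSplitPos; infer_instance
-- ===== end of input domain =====

-- B replaces A's interleaved two-pointer scan by two passes: build a run table
-- (maximal runs of values > threshold), then pick the last run wide enough (objective: simpler).

-- ===== PORT A =====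
-- inner `while h[temp] > threshold` loop of A (returns the final `count`);
-- fuel is only a structural-recursion totality guard (h.length is always enough)
def pvInnerA (h : List Int) (t : Int) : (fuel temp count : Nat) → Nat
  | 0, _, count => count
  | fuel + 1, temp, count =>
    if h.getD temp 0 > t then
      (if temp + 1 ≥ h.length then count + 1
       else pvInnerA h t fuel (temp + 1) (count + 1))
    else count

-- outer `while r < len(h)` loop of A, carrying (start, end, l, r); fuel as above
def pvLoopA (h : List Int) (t w : Int) : (fuel : Nat) → (start end_ l r : Nat) → Nat × Nat
  | 0, start, end_, _, _ => (start, end_)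
  | fuel + 1, start, end_, l, r =>
    if r < h.length then
      if h.getD r 0 ≤ t then
        pvLoopA h t w fuel start end_ l (r + 1)
      else
        let count := pvInnerA h t h.length r 0
        if (count : Int) ≥ w then
          pvLoopA h t w fuel r (r + count) r (r + count)
        else
          pvLoopA h t w fuel start end_ (r + count) (r + count)
    else (start, end_)

def FindHSplitPos (h_ : List Int) (threshold : Int) (width : Int) : List Int :=
  let p := pvLoopA h_ threshold width h_.length 0 0 0 0
  [(p.1 : Int), (p.2 : Int)]

-- ===== PORT B =====
-- one step of Source B's first pass: extend the last run if contiguous, else open a new one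
def pvStepB (t : Int) (runs : List (Int × Int)) (iv : Int × Int) : List (Int × Int) :=
  if iv.2 > t then
    match runs.getLast? with
    | some (s, ln) => if s + ln = iv.1 then runs.dropLast ++ [(s, ln + 1)] else runs ++ [(iv.1, 1)]
    | none => [(iv.1, 1)]
  else runs

-- Source B's second pass: `for s, ln in reversed(runs): if ln >= width: return [s, s+ln]`
def pvSelB (w : Int) : List (Int × Int) → List Int
  | [] => [0, 0]
  | (s, ln) :: rest => if ln ≥ w then [s, s + ln] else pvSelB w rest

def FindHSplitPos_alt (h_ : List Int) (threshold : Int) (width : Int) : List Int :=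
  let runs := (PySem.List.enumerate h_).foldl (pvStepB threshold) []
  pvSelB width runs.reverse

-- ===== PRECONDITION & SPEC =====
def Spec_FindHSplitPos (h_ : List Int) (threshold : Int) (width : Int) (out : List Int) : Prop := out = FindHSplitPos_alt h_ threshold width
instance (h_ : List Int) (threshold : Int) (width : Int) (out : List Int) : Decidable (Spec_FindHSplitPos h_ threshold width out) := by unfold Spec_FindHSplitPos; infer_instance

-- ===== CLAIM (what is proved, stated in full; the proofs are below) =====
def Claim_equal_FindHSplitPos : Prop := ∀ (h_ : List Int) (threshold : Int) (width : Int), Dom_FindHSplitPos h_ threshold width → Spec_FindHSplitPos h_ threshold width (FindHSplitPos h_ threshold width)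

-- ===== LEMMAS AND PROOFS =====

-- reference: number of leading elements > t
def pvCnt (t : Int) (xs : List Int) : Nat := (xs.takeWhile (fun x => decide (x > t))).length

-- reference run table: maximal runs of elements > t, as (absolute start index, length)
def pvRuns (t : Int) (i : Nat) : List Int → List (Nat × Nat)
  | [] => []
  | x :: xs =>
    if x > t then
      (i, pvCnt t (x :: xs)) :: pvRuns t (i + pvCnt t (x :: xs)) (xs.drop (pvCnt t (x :: xs) - 1))
    else pvRuns t (i + 1) xs
termination_by xs => xs.length
decreasing_by
  · simp only [List.length_drop, List.length_cons]; omega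
  · simp only [List.length_cons]; omega

-- A's selection, replayed over the run table
def pvApply (w : Int) (p : Nat × Nat) (rs : List (Nat × Nat)) : Nat × Nat :=
  rs.foldl (fun p r => if (r.2 : Int) ≥ w then (r.1, r.1 + r.2) else p) p

def pvRC (p : Nat × Nat) : Int × Int := ((p.1 : Int), (p.2 : Int))

-- appending a run table to an accumulator, joining the first run to acc's last if contiguous
def pvGlue (acc : List (Int × Int)) : List (Nat × Nat) → List (Int × Int)
  | [] => acc
  | (j, c) :: rest =>
    match acc.getLast? with
    | some (s, ln) =>
      if s + ln = (j : Int) then acc.dropLast ++ ((s, ln + (c : Int)) :: rest.map pvRC)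
      else acc ++ (((j : Int), (c : Int)) :: rest.map pvRC)
    | none => acc ++ (((j : Int), (c : Int)) :: rest.map pvRC)

theorem pvCnt_pos (t : Int) (x : Int) (xs : List Int) (hx : x > t) :
    pvCnt t (x :: xs) = pvCnt t xs + 1 := by
  simp [pvCnt, hx]

theorem pvCnt_neg (t : Int) (x : Int) (xs : List Int) (hx : ¬ x > t) :
    pvCnt t (x :: xs) = 0 := by
  simp [pvCnt, hx]

theorem pvCnt_le (t : Int) (xs : List Int) : pvCnt t xs ≤ xs.length := by
  unfold pvCnt
  exact (List.takeWhile_sublist _).length_le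

theorem pvRuns_nil (t : Int) (i : Nat) : pvRuns t i [] = [] := by rw [pvRuns]

theorem pvRuns_cons (t : Int) (i : Nat) (x : Int) (xs : List Int) :
    pvRuns t i (x :: xs) =
      if x > t then
        (i, pvCnt t (x :: xs)) ::
          pvRuns t (i + pvCnt t (x :: xs)) (xs.drop (pvCnt t (x :: xs) - 1))
      else pvRuns t (i + 1) xs := by
  rw [pvRuns]

theorem pvGlue_nil (acc : List (Int × Int)) : pvGlue acc [] = acc := rfl

theorem pvGlue_cons_none (acc : List (Int × Int)) (hacc : acc.getLast? = none)
    (j c : Nat) (rest : List (Nat × Nat)) :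
    pvGlue acc ((j, c) :: rest) = acc ++ (((j : Int), (c : Int)) :: rest.map pvRC) := by
  simp [pvGlue, hacc]

theorem pvGlue_cons_some (acc : List (Int × Int)) (s ln : Int)
    (hacc : acc.getLast? = some (s, ln)) (j c : Nat) (rest : List (Nat × Nat)) :
    pvGlue acc ((j, c) :: rest) =
      if s + ln = (j : Int) then acc.dropLast ++ ((s, ln + (c : Int)) :: rest.map pvRC)
      else acc ++ (((j : Int), (c : Int)) :: rest.map pvRC) := by
  simp [pvGlue, hacc]

theorem pvRuns_ge (t : Int) (xs : List Int) (i : Nat) : ∀ p ∈ pvRuns t i xs, i ≤ p.1 := by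
  fun_induction pvRuns t i xs with
  | case1 => simp
  | case2 i x xs hx ih =>
    intro p hp
    rcases List.mem_cons.mp hp with rfl | hp
    · simp
    · have := ih p hp
      omega
  | case3 i x xs hx ih =>
    intro p hp
    have := ih p hp
    omega

theorem pvInnerA_eq (h : List Int) (t : Int) :
    ∀ n temp count, h.length - temp ≤ n → temp < h.length →
      pvInnerA h t n temp count = count + pvCnt t (h.drop temp) := by
  intro n
  induction n with
  | zero => intro temp count h1 h2; omega
  | succ n ih =>
    intro temp count _ htemp
    have hget : h.getD temp 0 = h[temp] := List.getD_eq_getElem h 0 htemp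
    have hdrop : h.drop temp = h[temp] :: h.drop (temp + 1) := List.drop_eq_getElem_cons htemp
    rw [pvInnerA, hget, hdrop]
    by_cases hx : h[temp] > t
    · rw [if_pos hx, pvCnt_pos t _ _ hx]
      by_cases hend : temp + 1 ≥ h.length
      · rw [if_pos hend]
        have : h.drop (temp + 1) = [] := List.drop_eq_nil_iff.mpr (by omega)
        rw [this]
        simp [pvCnt]
      · rw [if_neg hend, ih (temp + 1) (count + 1) (by omega) (by omega)]
        omega
    · rw [if_neg (by omega), pvCnt_neg t _ _ hx]
      omega

theorem pvApply_cons (w : Int) (p : Nat × Nat) (r : Nat × Nat) (rs : List (Nat × Nat)) :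
    pvApply w p (r :: rs) = pvApply w (if (r.2 : Int) ≥ w then (r.1, r.1 + r.2) else p) rs := rfl

theorem pvLoopA_eq (h : List Int) (t w : Int) :
    ∀ n r s e l, h.length - r ≤ n → r ≤ h.length →
      pvLoopA h t w n s e l r = pvApply w (s, e) (pvRuns t r (h.drop r)) := by
  intro n
  induction n with
  | zero =>
    intro r s e l h1 h2
    have hr : r = h.length := by omega
    rw [pvLoopA, hr, List.drop_length, pvRuns_nil]
    rfl
  | succ n ih =>
    intro r s e l h1 h2
    by_cases hr : r < h.length
    · have hget : h.getD r 0 = h[r] := List.getD_eq_getElem h 0 hr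
      have hdrop : h.drop r = h[r] :: h.drop (r + 1) := List.drop_eq_getElem_cons hr
      rw [pvLoopA, if_pos hr, hget]
      by_cases hx : h[r] > t
      · rw [if_neg (by omega)]
        have hcnt : pvInnerA h t h.length r 0 = pvCnt t (h.drop r) := by
          rw [pvInnerA_eq h t h.length r 0 (by omega) hr]
          omega
        set c := pvCnt t (h.drop r) with hc
        have hc1 : 1 ≤ c := by
          rw [hc, hdrop, pvCnt_pos t _ _ hx]; omega
        have hcle : c ≤ h.length - r := by
          have := pvCnt_le t (h.drop r)
          rw [List.length_drop] at this
          omega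
        have hdrop2 : (h.drop (r + 1)).drop (c - 1) = h.drop (r + c) := by
          rw [List.drop_drop]
          congr 1
          omega
        have hruns : pvRuns t r (h.drop r) = (r, c) :: pvRuns t (r + c) (h.drop (r + c)) := by
          rw [hdrop, pvRuns_cons, if_pos hx, ← hdrop, ← hc, hdrop2]
        rw [hruns, pvApply_cons]
        simp only [hcnt]
        by_cases hw : (c : Int) ≥ w
        · rw [if_pos hw, if_pos hw, ih (r + c) r (r + c) r (by omega) (by omega)]
        · rw [if_neg hw, if_neg hw, ih (r + c) s e (r + c) (by omega) (by omega)]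
      · rw [if_pos (by omega), ih (r + 1) s e l (by omega) (by omega)]
        rw [hdrop, pvRuns_cons, if_neg hx]
    · have hr' : r = h.length := by omega
      rw [pvLoopA, if_neg (by omega), hr', List.drop_length, pvRuns_nil]
      rfl

-- pvStepB on a hot element is gluing a one-element run
theorem pvStepB_eq_glue (t : Int) (acc : List (Int × Int)) (i : Nat) (x : Int) (hx : x > t) :
    pvStepB t acc ((i : Int), x) = pvGlue acc [(i, 1)] := by
  cases hacc : acc.getLast? with
  | none =>
    have hnil : acc = [] := List.getLast?_eq_none_iff.mp hacc
    subst hnil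
    rw [pvGlue_cons_none [] hacc]
    simp [pvStepB, hx]
  | some p =>
    cases p with
    | mk s ln =>
      rw [pvGlue_cons_some acc s ln hacc]
      simp only [pvStepB, if_pos hx, hacc, List.map_nil, Nat.cast_one]

-- gluing a length-1 run then a contiguous run table = gluing the merged run table
theorem pvGlue_glue (acc : List (Int × Int)) (i : Nat) (c : Nat)
    (rest : List (Nat × Nat)) :
    pvGlue (pvGlue acc [(i, 1)]) ((i + 1, c) :: rest) = pvGlue acc ((i, c + 1) :: rest) := by
  cases hacc : acc.getLast? with
  | none =>
    have hnil : acc = [] := List.getLast?_eq_none_iff.mp hacc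
    subst hnil
    rw [pvGlue_cons_none [] hacc i 1 [], pvGlue_cons_none [] hacc i (c + 1) rest]
    simp only [List.map_nil, List.nil_append, Nat.cast_one]
    rw [pvGlue_cons_some [((i : Int), (1 : Int))] (i : Int) (1 : Int) (by simp) (i + 1) c rest]
    rw [if_pos (by push_cast; ring)]
    simp only [List.dropLast_singleton, List.nil_append]
    rw [show (1 : Int) + (c : Int) = ((c + 1 : Nat) : Int) by push_cast; ring]
  | some p =>
    cases p with
    | mk s ln =>
      rw [pvGlue_cons_some acc s ln hacc i 1 [], pvGlue_cons_some acc s ln hacc i (c + 1) rest]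
      simp only [List.map_nil, Nat.cast_one]
      by_cases hcon : s + ln = (i : Int)
      · rw [if_pos hcon, if_pos hcon]
        rw [pvGlue_cons_some (acc.dropLast ++ [(s, ln + 1)]) s (ln + 1)
          List.getLast?_concat (i + 1) c rest]
        rw [if_pos (by push_cast; omega)]
        rw [List.dropLast_concat]
        rw [show ln + 1 + (c : Int) = ln + ((c + 1 : Nat) : Int) by push_cast; ring]
      · rw [if_neg hcon, if_neg hcon]
        rw [pvGlue_cons_some (acc ++ [((i : Int), (1 : Int))]) (i : Int) (1 : Int)
          List.getLast?_concat (i + 1) c rest]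
        rw [if_pos (by push_cast; ring)]
        rw [List.dropLast_concat]
        rw [show (1 : Int) + (c : Int) = ((c + 1 : Nat) : Int) by push_cast; ring]

-- gluing a length-1 run then a far-away run table = gluing them together
theorem pvGlue_far (acc : List (Int × Int)) (i : Nat) (rs : List (Nat × Nat))
    (hrs : ∀ p ∈ rs, i + 2 ≤ p.1) :
    pvGlue (pvGlue acc [(i, 1)]) rs = pvGlue acc ((i, 1) :: rs) := by
  cases rs with
  | nil => exact pvGlue_nil _
  | cons q r2 =>
    cases q with
    | mk j c2 =>
      have hj : i + 2 ≤ j := hrs (j, c2) (by simp)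
      cases hacc : acc.getLast? with
      | none =>
        have hnil : acc = [] := List.getLast?_eq_none_iff.mp hacc
        subst hnil
        rw [pvGlue_cons_none [] hacc i 1 [], pvGlue_cons_none [] hacc i 1 ((j, c2) :: r2)]
        simp only [List.map_nil, List.nil_append, Nat.cast_one]
        rw [pvGlue_cons_some [((i : Int), (1 : Int))] (i : Int) (1 : Int) (by simp) j c2 r2]
        rw [if_neg (by omega)]
        simp [pvRC]
      | some p =>
        cases p with
        | mk s ln =>
          rw [pvGlue_cons_some acc s ln hacc i 1 [], pvGlue_cons_some acc s ln hacc i 1 ((j, c2) :: r2)]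
          simp only [List.map_nil, Nat.cast_one]
          by_cases hcon : s + ln = (i : Int)
          · rw [if_pos hcon, if_pos hcon]
            rw [pvGlue_cons_some (acc.dropLast ++ [(s, ln + 1)]) s (ln + 1)
              List.getLast?_concat j c2 r2]
            rw [if_neg (by rw [show s + (ln + 1) = (s + ln) + 1 by ring, hcon]; omega)]
            simp [pvRC, List.append_assoc]
          · rw [if_neg hcon, if_neg hcon]
            rw [pvGlue_cons_some (acc ++ [((i : Int), (1 : Int))]) (i : Int) (1 : Int)
              List.getLast?_concat j c2 r2]
            rw [if_neg (by omega)]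
            simp [pvRC, List.append_assoc]

theorem pvFoldB_eq (t : Int) :
    ∀ (xs : List Int) (i : Nat) (acc : List (Int × Int)),
      (PySem.List.enumerate xs (i : Int)).foldl (pvStepB t) acc = pvGlue acc (pvRuns t i xs) := by
  intro xs
  induction xs with
  | nil => intro i acc; rw [PySem.List.enumerate_nil, pvRuns_nil]; rfl
  | cons x xs ih =>
    intro i acc
    rw [PySem.List.enumerate_cons, List.foldl_cons]
    have hcast : (i : Int) + 1 = ((i + 1 : Nat) : Int) := by push_cast; ring
    rw [hcast, ih (i + 1) (pvStepB t acc ((i : Int), x))]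
    by_cases hx : x > t
    · rw [pvStepB_eq_glue t acc i x hx]
      cases xs with
      | nil =>
        rw [pvRuns_nil, pvGlue_nil]
        rw [show pvRuns t i [x] = (i, 1) :: pvRuns t (i + 1) [] by
          rw [pvRuns_cons, if_pos hx]
          simp [pvCnt, hx]]
        rw [pvRuns_nil]
      | cons y ys =>
        by_cases hy : y > t
        · have hc' : pvCnt t (y :: ys) = pvCnt t ys + 1 := pvCnt_pos t y ys hy
          rw [show pvRuns t (i + 1) (y :: ys) =
              (i + 1, pvCnt t (y :: ys)) ::
                pvRuns t (i + 1 + pvCnt t (y :: ys)) (ys.drop (pvCnt t (y :: ys) - 1)) by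
            rw [pvRuns_cons, if_pos hy]]
          rw [pvGlue_glue]
          rw [show pvRuns t i (x :: y :: ys) =
              (i, pvCnt t (y :: ys) + 1) ::
                pvRuns t (i + 1 + pvCnt t (y :: ys)) (ys.drop (pvCnt t (y :: ys) - 1)) by
            rw [pvRuns_cons, if_pos hx, pvCnt_pos t x (y :: ys) hx]
            congr 2
            · omega
            · rw [show pvCnt t (y :: ys) + 1 - 1 = (pvCnt t (y :: ys) - 1) + 1 by omega,
                List.drop_succ_cons]]
        · have h1 : pvCnt t (x :: y :: ys) = 1 := by
            rw [pvCnt_pos t x (y :: ys) hx, pvCnt_neg t y ys hy]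
          rw [show pvRuns t i (x :: y :: ys) = (i, 1) :: pvRuns t (i + 1) (y :: ys) by
            rw [pvRuns_cons, if_pos hx, h1]
            simp]
          refine pvGlue_far acc i (pvRuns t (i + 1) (y :: ys)) ?_
          intro p hp
          rw [pvRuns_cons, if_neg hy] at hp
          have := pvRuns_ge t ys (i + 1 + 1) p hp
          omega
    · rw [show pvStepB t acc ((i : Int), x) = acc by simp [pvStepB, hx]]
      rw [pvRuns_cons, if_neg hx]

theorem pvSel_eq (w : Int) :
    ∀ rs : List (Nat × Nat),
      pvSelB w ((rs.map pvRC).reverse) =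
        [((pvApply w (0, 0) rs).1 : Int), ((pvApply w (0, 0) rs).2 : Int)] := by
  intro rs
  induction rs using List.reverseRecOn with
  | nil => rfl
  | append_singleton rs r ih =>
    cases r with
    | mk j c =>
      rw [List.map_append, List.reverse_append]
      simp only [List.map_cons, List.map_nil, List.reverse_cons, List.reverse_nil,
        List.nil_append, List.cons_append]
      rw [show pvSelB w (pvRC (j, c) :: (rs.map pvRC).reverse) =
          if (c : Int) ≥ w then [(j : Int), (j : Int) + (c : Int)]
          else pvSelB w ((rs.map pvRC).reverse) by
        simp [pvSelB, pvRC]]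
      unfold pvApply
      rw [List.foldl_append]
      simp only [List.foldl_cons, List.foldl_nil]
      by_cases hw : (c : Int) ≥ w
      · rw [if_pos hw, if_pos hw]
        push_cast
        rfl
      · rw [if_neg hw, if_neg hw, ih]
        rfl

-- ===== VERDICT (by name: the statement is the Claim_ definition above) =====
theorem FindHSplitPos_spec : Claim_equal_FindHSplitPos := by
  intro h t w _
  unfold Spec_FindHSplitPos FindHSplitPos FindHSplitPos_alt
  have hA := pvLoopA_eq h t w h.length 0 0 0 0 (by omega) (by omega)
  have hB := pvFoldB_eq t h 0 []
  simp only [List.drop_zero] at hA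
  rw [hA]
  have : (PySem.List.enumerate h 0).foldl (pvStepB t) [] = (pvRuns t 0 h).map pvRC := by
    simp only [Nat.cast_zero] at hB
    rw [hB]
    cases pvRuns t 0 h with
    | nil => rfl
    | cons a rest =>
      cases a with
      | mk j c =>
        rw [pvGlue_cons_none [] rfl j c rest]
        simp [pvRC]
  rw [this, pvSel_eq w]
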